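-- pv_equiv track=rewrite | github.com/yango-unchained42/fpl-simulation | src/utils/fpl_scoring.py | simulate_bonus_points
-- ===== SOURCE A (Python) =====
-- BONUS_POINTS = [3, 2, 1]
--
-- def simulate_bonus_points(
--     player_bps_scores: dict[int, int],
-- ) -> dict[int, int]:
--     """Simulate bonus point allocation based on BPS scores.
--
--     Args:
--         player_bps_scores: Dict mapping player_id to BPS score.
--
--     Returns:
--         Dict mapping player_id to bonus points (0-3).
--     """
--     # Sort by BPS descending
--     sorted_players = sorted(player_bps_scores.items(), key=lambda x: x[1], reverse=True)
--
--     bonus_allocation: dict[int, int] = {pid: 0 for pid in player_bps_scores}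
--
--     # Award bonus points to top 3
--     for i, (pid, _) in enumerate(sorted_players[:3]):
--         bonus_allocation[pid] = BONUS_POINTS[i]
--
--     return bonus_allocation
-- ===== SOURCE B (Python) =====
-- BONUS_POINTS = [3, 2, 1]
--
--
-- def simulate_bonus_points(
--     player_bps_scores: dict[int, int],
-- ) -> dict[int, int]:
--     # One-pass partial selection: keep at most the top-3 (pid, bps) entries,
--     # descending, ties kept in first-seen order; no full sort.
--     top: list[tuple[int, int]] = []
--     for pid, bps in player_bps_scores.items():
--         i = 0
--         while i < len(top) and top[i][1] >= bps:
--             i += 1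
--         top.insert(i, (pid, bps))
--         del top[3:]
--
--     bonus_allocation = {pid: 0 for pid in player_bps_scores}
--     for i, (pid, _) in enumerate(top):
--         bonus_allocation[pid] = BONUS_POINTS[i]
--     return bonus_allocation
-- ===== Notes on version B (the rewrite author's own statement) =====
-- stated objective: alternative
-- what changed: Replaces the full stable descending sort with a single pass that maintains a bounded top-3 list by insertion-before-first-strictly-smaller and truncation; it trades the library sort for an O(n) bounded-selection loop (not measurably faster in CPython).
import Mathlib
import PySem

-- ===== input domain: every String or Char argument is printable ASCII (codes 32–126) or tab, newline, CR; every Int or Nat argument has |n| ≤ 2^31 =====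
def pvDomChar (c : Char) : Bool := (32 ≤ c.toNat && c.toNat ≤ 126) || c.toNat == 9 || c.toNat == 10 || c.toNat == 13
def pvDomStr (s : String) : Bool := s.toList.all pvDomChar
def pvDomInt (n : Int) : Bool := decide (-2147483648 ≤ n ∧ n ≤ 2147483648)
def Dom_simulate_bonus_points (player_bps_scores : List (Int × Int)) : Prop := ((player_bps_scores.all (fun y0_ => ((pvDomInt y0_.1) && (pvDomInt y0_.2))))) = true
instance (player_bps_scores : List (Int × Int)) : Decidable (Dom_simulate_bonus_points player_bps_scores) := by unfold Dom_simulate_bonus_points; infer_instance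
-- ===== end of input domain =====

-- B replaces A's full stable descending sort by a one-pass bounded top-3 selection (insert-and-truncate): an alternative algorithm of the same measured cost.


def BONUS_POINTS : List Int := [3, 2, 1]

-- ===== PORT A =====
def simulate_bonus_points (player_bps_scores : List (Int × Int)) : List (Int × Int) :=
  -- sorted_players = sorted(player_bps_scores.items(), key=lambda x: x[1], reverse=True)
  let sorted_players := PySem.List.sorted player_bps_scores (fun x => x.2) true
  -- bonus_allocation = {pid: 0 for pid in player_bps_scores}
  let bonus_allocation : PySem.Dict Int Int :=
    player_bps_scores.foldl (fun d p => d.insert p.1 0) PySem.Dict.empty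
  -- for i, (pid, _) in enumerate(sorted_players[:3]): bonus_allocation[pid] = BONUS_POINTS[i]
  let final :=
    (PySem.List.enumerate (PySem.List.slice sorted_players none (some 3)) 0).foldl
      (fun d ip =>
        match PySem.List.pyGet? BONUS_POINTS ip.1 with
        | some b => d.insert ip.2.1 b
        | none => d)   -- guard for totality only; i ranges over 0..2 so BONUS_POINTS[i] exists
      bonus_allocation
  final.items

-- ===== PORT B =====
-- insert x before the first element whose score is strictly smaller (Source B's while-loop + insert)
def topInsert (x : Int × Int) : List (Int × Int) → List (Int × Int)
  | [] => [x]
  | y :: ys => if y.2 ≥ x.2 then y :: topInsert x ys else x :: y :: ys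

def simulate_bonus_points_alt (player_bps_scores : List (Int × Int)) : List (Int × Int) :=
  -- one pass maintaining at most the top-3 entries, descending, stable; del top[3:] = take 3
  let top := player_bps_scores.foldl (fun t x => (topInsert x t).take 3) []
  -- bonus_allocation = {pid: 0 for pid in player_bps_scores}
  let bonus_allocation : PySem.Dict Int Int :=
    player_bps_scores.foldl (fun d p => d.insert p.1 0) PySem.Dict.empty
  -- for i, (pid, _) in enumerate(top): bonus_allocation[pid] = BONUS_POINTS[i]
  let final :=
    (PySem.List.enumerate top 0).foldl
      (fun d ip =>
        match PySem.List.pyGet? BONUS_POINTS ip.1 with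
        | some b => d.insert ip.2.1 b
        | none => d)   -- guard for totality only
      bonus_allocation
  final.items

-- ===== PRECONDITION & SPEC =====
def Spec_simulate_bonus_points (player_bps_scores : List (Int × Int)) (out : List (Int × Int)) : Prop := out = simulate_bonus_points_alt player_bps_scores
instance (player_bps_scores : List (Int × Int)) (out : List (Int × Int)) : Decidable (Spec_simulate_bonus_points player_bps_scores out) := by unfold Spec_simulate_bonus_points; infer_instance

-- ===== CLAIM (what is proved, stated in full; the proofs are below) =====
def Claim_equal_simulate_bonus_points : Prop := ∀ (player_bps_scores : List (Int × Int)), Dom_simulate_bonus_points player_bps_scores → Spec_simulate_bonus_points player_bps_scores (simulate_bonus_points player_bps_scores)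

-- ===== LEMMAS AND PROOFS =====

-- Source B's insertion step is exactly PySem's insertBy with the reverse-sort predicate
theorem topInsert_eq_insertBy (x : Int × Int) (l : List (Int × Int)) :
    topInsert x l = PySem.List.insertBy (fun a b => decide (b.2 < a.2)) x l := by
  induction l with
  | nil => rfl
  | cons y ys ih =>
      simp only [topInsert, PySem.List.insertBy, ih]
      by_cases h : y.2 < x.2
      · simp [h, not_le.mpr h]
      · simp [h, not_lt.mp h]

-- truncation commutes with insertBy: only the first n positions matter for the truncated result
theorem take_insertBy (b : (Int × Int) → (Int × Int) → Bool) (x : Int × Int) :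
    ∀ (l : List (Int × Int)) (n : Nat),
      (PySem.List.insertBy b x l).take n = (PySem.List.insertBy b x (l.take n)).take n := by
  intro l
  induction l with
  | nil => intro n; simp
  | cons y ys ih =>
      intro n
      cases n with
      | zero => simp
      | succ m =>
          rw [List.take_succ_cons]
          simp only [PySem.List.insertBy]
          by_cases h : b x y = true
          · rw [if_pos h, if_pos h, List.take_succ_cons, List.take_succ_cons]
            cases m with
            | zero => simp
            | succ k =>
                rw [List.take_succ_cons, List.take_succ_cons, List.take_take,
                  Nat.min_eq_left (Nat.le_succ k)]
          · rw [if_neg h, if_neg h, List.take_succ_cons, List.take_succ_cons, ih m]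

-- the one-pass truncated fold computes the take-3 of the full insertion fold
theorem foldl_take_insertBy (b : (Int × Int) → (Int × Int) → Bool) :
    ∀ (xs : List (Int × Int)) (acc : List (Int × Int)),
      xs.foldl (fun t x => (PySem.List.insertBy b x t).take 3) (acc.take 3) =
        (xs.foldl (fun a x => PySem.List.insertBy b x a) acc).take 3 := by
  intro xs
  induction xs with
  | nil => intro acc; rfl
  | cons x xs ih =>
      intro acc
      simp only [List.foldl_cons]
      rw [← take_insertBy b x acc 3]
      exact ih (PySem.List.insertBy b x acc)

-- B's top list = take 3 of A's stable descending sort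
theorem top_eq_take_sorted (l : List (Int × Int)) :
    l.foldl (fun t x => (topInsert x t).take 3) [] =
      (PySem.List.sorted l (fun x => x.2) true).take 3 := by
  rw [PySem.List.sorted_rev_eq_foldl_insertBy]
  have h : (fun (t : List (Int × Int)) (x : Int × Int) => (topInsert x t).take 3)
      = (fun t x => (PySem.List.insertBy (fun a b => decide (b.2 < a.2)) x t).take 3) := by
    funext t x; rw [topInsert_eq_insertBy]
  rw [h]
  exact foldl_take_insertBy (fun a b => decide (b.2 < a.2)) l []

-- ===== VERDICT (by name: the statement is the Claim_ definition above) =====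
theorem simulate_bonus_points_spec : Claim_equal_simulate_bonus_points := by
  intro l _
  show simulate_bonus_points l = simulate_bonus_points_alt l
  simp only [simulate_bonus_points, simulate_bonus_points_alt]
  rw [top_eq_take_sorted, PySem.List.slice_to _ (by norm_num)]
  rfl
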